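-- pv_equiv track=rewrite | github.com/ivi982010/SySdL-TPs | Lexer.py | a_OpRel5
-- ===== SOURCE A (Python) =====
-- def a_OpRel5(tokens, acu):
-- 	s=0;
-- 	for c in acu:
-- 		if s==0 and c=='>':
-- 			s=1
-- 		elif s==1 and c=='=':
-- 			s=2
-- 		else:
-- 			s=-1
-- 			break
-- 	if s==2:
-- 		tokens.append(("<OpRel>",acu))
-- 	return s==2
-- ===== SOURCE B (Python) =====
-- def a_OpRel5(tokens, acu):
-- 	ok = tuple(acu) == ('>', '=')
-- 	if ok:
-- 		tokens.append(("<OpRel>", acu))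
-- 	return ok
-- ===== Notes on version B (the rewrite author's own statement) =====
-- stated objective: simpler
-- what changed: Replaces the per-character state machine with a single closed-form comparison of the whole character sequence against ('>', '='), eliminating the loop and accumulator state.
import Mathlib
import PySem

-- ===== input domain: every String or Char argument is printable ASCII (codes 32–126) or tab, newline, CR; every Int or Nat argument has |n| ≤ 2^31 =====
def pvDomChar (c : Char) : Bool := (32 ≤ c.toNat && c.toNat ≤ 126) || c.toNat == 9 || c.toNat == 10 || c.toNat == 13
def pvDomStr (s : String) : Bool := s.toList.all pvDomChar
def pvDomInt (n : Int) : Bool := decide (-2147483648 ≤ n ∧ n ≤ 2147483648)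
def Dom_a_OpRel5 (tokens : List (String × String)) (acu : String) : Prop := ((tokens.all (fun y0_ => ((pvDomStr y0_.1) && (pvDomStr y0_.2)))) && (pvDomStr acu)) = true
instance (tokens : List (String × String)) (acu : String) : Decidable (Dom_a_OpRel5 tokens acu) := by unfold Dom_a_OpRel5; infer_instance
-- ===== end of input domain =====

-- B replaces A's per-character state machine by one closed-form comparison of the
-- whole character sequence with ['>', '=']; the equivalence proved is about the
-- RETURN value only (both Pythons also append the same token to `tokens` when matching).

-- ===== PORT A =====
-- the for-loop with its state s and the `break` on the else-branch
def a_OpRel5_loop : Int → List Char → Int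
  | s, [] => s
  | s, c :: cs =>
    if s == 0 && c == '>' then a_OpRel5_loop 1 cs
    else if s == 1 && c == '=' then a_OpRel5_loop 2 cs
    else -1  -- break

def a_OpRel5 (tokens : List (String × String)) (acu : String) : Bool :=
  a_OpRel5_loop 0 acu.toList == 2

-- ===== PORT B =====
def a_OpRel5_alt (tokens : List (String × String)) (acu : String) : Bool :=
  acu.toList == ['>', '=']

-- ===== PRECONDITION & SPEC =====
def Spec_a_OpRel5 (tokens : List (String × String)) (acu : String) (out : Bool) : Prop := out = a_OpRel5_alt tokens acu
instance (tokens : List (String × String)) (acu : String) (out : Bool) : Decidable (Spec_a_OpRel5 tokens acu out) := by unfold Spec_a_OpRel5; infer_instance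

-- ===== CLAIM (what is proved, stated in full; the proofs are below) =====
def Claim_equal_a_OpRel5 : Prop := ∀ (tokens : List (String × String)) (acu : String), Dom_a_OpRel5 tokens acu → Spec_a_OpRel5 tokens acu (a_OpRel5 tokens acu)

-- ===== LEMMAS AND PROOFS =====
-- the state machine starting at 0 ends in state 2 exactly on the sequence ['>', '=']
theorem a_OpRel5_loop_char (l : List Char) :
    (a_OpRel5_loop 0 l == 2) = (l == ['>', '=']) := by
  match l with
  | [] => rfl
  | [c] =>
    simp only [a_OpRel5_loop]
    by_cases h : c = '>' <;> simp [h]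
  | c :: d :: rest =>
    simp only [a_OpRel5_loop]
    by_cases hc : c = '>'
    · by_cases hd : d = '='
      · cases rest with
        | nil => simp [hc, hd, a_OpRel5_loop]
        | cons e es => simp [hc, hd, a_OpRel5_loop]
      · simp [hc, hd]
    · simp [hc]

-- ===== VERDICT (by name: the statement is the Claim_ definition above) =====
theorem a_OpRel5_spec : Claim_equal_a_OpRel5 := by
  intro tokens acu _
  unfold Spec_a_OpRel5 a_OpRel5 a_OpRel5_alt
  exact a_OpRel5_loop_char acu.toList
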